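-- pv_equiv track=rewrite | github.com/sofjones/Python-RNA-Secondary-Structure | src/energy_min.py | dotBracket
-- ===== SOURCE A (Python) =====
-- def dotBracket(seq, base_pairs, max_score):
--     d_b = seq
--     for i in range(0, len(seq)):
--         open_par = [(x, y) for x, y in base_pairs if x == i + 1]
--         closed_par = [(x, y) for x, y in base_pairs if y == i + 1]
--         if open_par:
--             d_b[i] = "("
--         elif closed_par:
--             d_b[i] = ")"
--         else:
--             d_b[i] = "."
--
--     return d_b
-- ===== SOURCE B (Python) =====
-- def dotBracket(seq, base_pairs, max_score):
--     n = len(seq)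
--     for i in range(n):
--         seq[i] = "."
--     for x, y in base_pairs:
--         if 1 <= y <= n:
--             seq[y - 1] = ")"
--     for x, y in base_pairs:
--         if 1 <= x <= n:
--             seq[x - 1] = "("
--     return seq
-- ===== Notes on version B (the rewrite author's own statement) =====
-- stated objective: faster
-- what changed: Instead of scanning all base_pairs twice for every position (quadratic), B fills the whole sequence with '.' once and then makes one bounds-guarded pass per bracket kind over base_pairs, writing ')' then '(' so the opener precedence of A's if/elif is preserved.
import Mathlib
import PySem

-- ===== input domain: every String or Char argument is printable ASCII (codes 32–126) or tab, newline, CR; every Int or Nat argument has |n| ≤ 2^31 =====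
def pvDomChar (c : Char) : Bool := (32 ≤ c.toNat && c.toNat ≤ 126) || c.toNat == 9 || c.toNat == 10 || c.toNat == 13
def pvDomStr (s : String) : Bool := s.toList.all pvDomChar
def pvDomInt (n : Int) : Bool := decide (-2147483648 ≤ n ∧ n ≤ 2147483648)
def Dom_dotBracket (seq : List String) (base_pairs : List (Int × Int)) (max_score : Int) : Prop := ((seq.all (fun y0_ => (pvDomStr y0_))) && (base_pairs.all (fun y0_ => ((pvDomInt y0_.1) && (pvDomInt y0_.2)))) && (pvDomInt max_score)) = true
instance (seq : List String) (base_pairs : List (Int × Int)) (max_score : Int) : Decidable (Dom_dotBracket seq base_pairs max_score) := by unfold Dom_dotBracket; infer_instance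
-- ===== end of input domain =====

-- B fills everything with '.' once, then makes one bounds-guarded pass per bracket kind over
-- base_pairs (')' first, then '(') instead of scanning all pairs at every position: faster.
-- Both the Python A and the Python B mutate seq in place and return it; the equivalence proved
-- here is about the return value.

-- ===== PORT A =====
def dotBracket (seq : List String) (base_pairs : List (Int × Int)) (_max_score : Int) : List String :=
  (PySem.List.pyRange 0 (seq.length : Int) 1).foldl
    (fun d_b i =>
      let open_par := base_pairs.filter (fun p => p.1 == i + 1)
      let closed_par := base_pairs.filter (fun p => p.2 == i + 1)
      if !open_par.isEmpty then d_b.set i.toNat "("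
      else if !closed_par.isEmpty then d_b.set i.toNat ")"
      else d_b.set i.toNat ".") seq

-- ===== PORT B =====
def dotBracket_alt (seq : List String) (base_pairs : List (Int × Int)) (_max_score : Int) : List String :=
  let n : Int := seq.length
  let s1 := seq.map (fun _ => ".")
  let s2 := base_pairs.foldl
    (fun s p => if 1 ≤ p.2 ∧ p.2 ≤ n then s.set (p.2 - 1).toNat ")" else s) s1
  base_pairs.foldl
    (fun s p => if 1 ≤ p.1 ∧ p.1 ≤ n then s.set (p.1 - 1).toNat "(" else s) s2

-- ===== PRECONDITION & SPEC =====
def Spec_dotBracket (seq : List String) (base_pairs : List (Int × Int)) (max_score : Int) (out : List String) : Prop := out = dotBracket_alt seq base_pairs max_score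
instance (seq : List String) (base_pairs : List (Int × Int)) (max_score : Int) (out : List String) : Decidable (Spec_dotBracket seq base_pairs max_score out) := by unfold Spec_dotBracket; infer_instance

-- ===== CLAIM (what is proved, stated in full; the proofs are below) =====
def Claim_equal_dotBracket : Prop := ∀ (seq : List String) (base_pairs : List (Int × Int)) (max_score : Int), Dom_dotBracket seq base_pairs max_score → Spec_dotBracket seq base_pairs max_score (dotBracket seq base_pairs max_score)

-- ===== LEMMAS AND PROOFS =====

-- element characterisation of B's guarded-write folds (the written value is constant,
-- so the order of the writes does not matter)
theorem getElem?_foldl_guard_set (bp : List (Int × Int)) (l : List String)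
    (sel : Int × Int → Int) (n : Int) (v : String) (j : Nat) :
    (bp.foldl (fun s p => if 1 ≤ sel p ∧ sel p ≤ n then s.set (sel p - 1).toNat v else s) l)[j]?
      = if bp.any (fun p => decide (1 ≤ sel p) && decide (sel p ≤ n) && ((sel p - 1).toNat == j))
          ∧ j < l.length then some v else l[j]? := by
  induction bp generalizing l with
  | nil => simp
  | cons p bp ih =>
      rw [List.foldl_cons, ih, List.any_cons]
      by_cases hg : 1 ≤ sel p ∧ sel p ≤ n
      · rw [if_pos hg, List.length_set, List.getElem?_set]
        by_cases hj : (sel p - 1).toNat = j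
        · rw [hj]
          simp only [decide_eq_true hg.1, decide_eq_true hg.2,
            beq_self_eq_true, Bool.and_true, Bool.true_or]
          by_cases hlt : j < l.length
          · simp [hlt]
          · simp [hlt]
        · have hb : ((sel p - 1).toNat == j) = false := beq_eq_false_iff_ne.mpr hj
          rw [hb, Bool.and_false, Bool.false_or, if_neg hj]
      · rw [if_neg hg]
        have hb : (decide (1 ≤ sel p) && decide (sel p ≤ n) && ((sel p - 1).toNat == j))
            = false := by
          rcases not_and_or.mp hg with h | h <;> simp [h]
        rw [hb, Bool.false_or]

-- length preservation of A's loop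
theorem length_foldl_range_set (g : Nat → String) (l : List String) (m : Nat) :
    ((List.range m).foldl (fun d i => d.set i (g i)) l).length = l.length := by
  induction m generalizing l with
  | zero => rfl
  | succ m ih => rw [List.range_succ, List.foldl_append]; simp [ih]

-- element characterisation of A's loop: every index i below m is overwritten with g i
theorem getElem?_foldl_range_set (g : Nat → String) (l : List String) (m : Nat) (j : Nat) :
    ((List.range m).foldl (fun d i => d.set i (g i)) l)[j]?
      = if j < m ∧ j < l.length then some (g j) else l[j]? := by
  induction m with
  | zero => simp
  | succ m ih =>
      rw [List.range_succ, List.foldl_append, List.foldl_cons, List.foldl_nil,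
        List.getElem?_set, length_foldl_range_set]
      by_cases hj : m = j
      · subst hj
        rw [if_pos rfl]
        by_cases hl : m < l.length
        · simp [hl]
        · simp [hl]
      · rw [if_neg hj, ih]
        have h1 : (j < m + 1 ∧ j < l.length) ↔ (j < m ∧ j < l.length) := by omega
        rw [if_congr h1 rfl rfl]

-- a filter is empty iff no element passes: as a Bool equation
theorem isEmpty_filter_eq_not_any (l : List (Int × Int)) (p : Int × Int → Bool) :
    (l.filter p).isEmpty = !(l.any p) := by
  rcases h : l.any p with _ | _
  · rw [Bool.not_false, List.isEmpty_iff, List.filter_eq_nil_iff]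
    intro a ha
    have := List.any_eq_false.mp h a ha
    simpa using this
  · rcases List.any_eq_true.mp h with ⟨a, ha, hp⟩
    rw [Bool.not_true, List.isEmpty_eq_false_iff]
    intro hnil
    exact (List.filter_eq_nil_iff.mp hnil a ha) hp

-- the value A writes at position j, as a function of j only
def pvAVal (base_pairs : List (Int × Int)) (j : Nat) : String :=
  if base_pairs.any (fun p => p.1 == (j : Int) + 1) then "("
  else if base_pairs.any (fun p => p.2 == (j : Int) + 1) then ")"
  else "."

theorem dotBracket_getElem? (seq : List String) (bp : List (Int × Int)) (ms : Int) (j : Nat) :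
    (dotBracket seq bp ms)[j]? = if j < seq.length ∧ j < seq.length then some (pvAVal bp j) else seq[j]? := by
  unfold dotBracket
  rw [PySem.List.pyRange_one]
  simp only [Int.sub_zero, Int.toNat_natCast, List.foldl_map]
  have hstep : (fun (d_b : List String) (k : Nat) =>
      (fun d_b (i : Int) =>
        let open_par := bp.filter (fun p => p.1 == i + 1)
        let closed_par := bp.filter (fun p => p.2 == i + 1)
        if !open_par.isEmpty then d_b.set i.toNat "("
        else if !closed_par.isEmpty then d_b.set i.toNat ")"
        else d_b.set i.toNat ".") d_b ((0 : Int) + k))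
      = fun d_b k => d_b.set k (pvAVal bp k) := by
    funext d_b k
    simp only [Int.zero_add, Int.toNat_natCast, pvAVal,
      isEmpty_filter_eq_not_any, Bool.not_not]
    rcases h1 : bp.any (fun p => p.1 == (k : Int) + 1) with _ | _ <;>
      rcases h2 : bp.any (fun p => p.2 == (k : Int) + 1) with _ | _ <;> simp
  rw [hstep, getElem?_foldl_range_set]

-- the bounds-guarded membership test of B agrees with A's positional test inside the sequence
theorem guard_any_eq (bp : List (Int × Int)) (sel : Int × Int → Int) (m j : Nat) (hj : j < m) :
    (bp.any (fun p => decide (1 ≤ sel p) && decide (sel p ≤ (m : Int)) && ((sel p - 1).toNat == j)))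
      = bp.any (fun p => sel p == (j : Int) + 1) := by
  refine List.any_congr rfl (fun p => ?_)
  rcases h : (sel p == (j : Int) + 1) with _ | _
  · have hne : sel p ≠ (j : Int) + 1 := by simpa using h
    rcases h1 : decide (1 ≤ sel p) with _ | _
    · simp
    · have hle : 1 ≤ sel p := of_decide_eq_true h1
      have hx : (sel p - 1).toNat ≠ j := by omega
      have hbe : ((sel p - 1).toNat == j) = false := beq_eq_false_iff_ne.mpr hx
      rw [hbe, Bool.and_false]
  · have he : sel p = (j : Int) + 1 := by simpa using h
    have h1 : 1 ≤ sel p := by omega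
    have h2 : sel p ≤ (m : Int) := by omega
    have h3 : (sel p - 1).toNat = j := by omega
    rw [h3, decide_eq_true h1, decide_eq_true h2]
    simp

theorem length_foldl_guard_set (bp : List (Int × Int)) (l : List String)
    (sel : Int × Int → Int) (n : Int) (v : String) :
    (bp.foldl (fun s p => if 1 ≤ sel p ∧ sel p ≤ n then s.set (sel p - 1).toNat v else s) l).length
      = l.length := by
  induction bp generalizing l with
  | nil => rfl
  | cons p bp ih =>
      rw [List.foldl_cons, ih]
      split_ifs <;> simp

theorem dotBracket_alt_getElem? (seq : List String) (bp : List (Int × Int)) (ms : Int) (j : Nat) :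
    (dotBracket_alt seq bp ms)[j]? = if j < seq.length then some (pvAVal bp j) else none := by
  simp only [dotBracket_alt]
  rw [getElem?_foldl_guard_set bp _ (fun p => p.1) _ "(" j,
      getElem?_foldl_guard_set bp _ (fun p => p.2) _ ")" j,
      length_foldl_guard_set, List.length_map]
  by_cases hj : j < seq.length
  · rw [guard_any_eq bp (fun p => p.1) seq.length j hj,
        guard_any_eq bp (fun p => p.2) seq.length j hj]
    have hdot : (seq.map (fun _ => "."))[j]? = some "." := by
      simp [hj]
    simp only [pvAVal, hj, and_true]
    rcases h1 : bp.any (fun p => p.1 == (j : Int) + 1) with _ | _ <;>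
      rcases h2 : bp.any (fun p => p.2 == (j : Int) + 1) with _ | _ <;>
        simp [hj]
  · have hdot : (seq.map (fun _ => "."))[j]? = none := by
      refine List.getElem?_eq_none ?_
      simpa using (by omega : seq.length ≤ j)
    simp [hj]

-- ===== VERDICT (by name: the statement is the Claim_ definition above) =====
theorem dotBracket_spec : Claim_equal_dotBracket := by
  intro seq bp ms _
  unfold Spec_dotBracket
  apply List.ext_getElem?
  intro j
  rw [dotBracket_getElem?, dotBracket_alt_getElem?]
  by_cases hj : j < seq.length
  · simp [hj]
  · simp [hj]
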